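-- pv_equiv track=rewrite | github.com/ydna985/exercices-inf1007 | ch06_3/exercice.py | combine_strings_and_numbers
-- ===== SOURCE A (Python) =====
-- def combine_strings_and_numbers(strings, num_combinations, excluded_multiples):
-- 	answer=[]
-- 	for letter in strings:
-- 		for number in range(1,num_combinations+1):
-- 			if excluded_multiples != None:
-- 				if number%excluded_multiples==0:
-- 					continue
-- 			answer.append(letter+str(number))
-- 	return sorted(answer, key=lambda letter_number: letter_number[1])
-- ===== SOURCE B (Python) =====
-- def combine_strings_and_numbers(strings, num_combinations, excluded_multiples):
--     # Stable 128-bucket counting sort on ord(s[1]) instead of sorted(key=s[1]).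
--     buckets = [[] for _ in range(128)]
--     for letter in strings:
--         for number in range(1, num_combinations + 1):
--             if excluded_multiples is not None and number % excluded_multiples == 0:
--                 continue
--             s = letter + str(number)
--             buckets[ord(s[1])].append(s)
--     out = []
--     for b in buckets:
--         out.extend(b)
--     return out
-- ===== Notes on version B (the rewrite author's own statement) =====
-- stated objective: alternative
-- what changed: B replaces sorted(key=s[1]) with a stable 128-bucket counting sort on the ASCII code of s[1], appending each generated string to its bucket and concatenating buckets in order.
import Mathlib
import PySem

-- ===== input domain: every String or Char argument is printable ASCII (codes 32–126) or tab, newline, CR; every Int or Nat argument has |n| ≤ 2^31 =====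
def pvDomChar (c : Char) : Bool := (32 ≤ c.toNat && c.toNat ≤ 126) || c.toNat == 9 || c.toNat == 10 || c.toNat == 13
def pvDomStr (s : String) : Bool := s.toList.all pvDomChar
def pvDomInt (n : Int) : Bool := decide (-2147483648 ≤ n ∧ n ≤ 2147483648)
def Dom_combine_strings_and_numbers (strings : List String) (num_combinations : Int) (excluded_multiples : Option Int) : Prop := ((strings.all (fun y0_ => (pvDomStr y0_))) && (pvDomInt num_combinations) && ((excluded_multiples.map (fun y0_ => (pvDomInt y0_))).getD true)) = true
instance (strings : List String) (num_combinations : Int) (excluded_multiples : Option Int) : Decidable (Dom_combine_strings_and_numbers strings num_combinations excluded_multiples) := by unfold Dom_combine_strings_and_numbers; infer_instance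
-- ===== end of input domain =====

-- B replaces sorted() with a stable 128-bucket counting sort keyed on s[1],
-- generating the strings in the same nested-loop order (objective: alternative).

-- ===== PORT A =====
-- the skip condition 'excluded_multiples != None' + 'number % excluded_multiples == 0'
def pvSkip (excluded_multiples : Option Int) (number : Int) : Bool :=
  match excluded_multiples with
  | some m => PySem.Int.mod number m == 0
  | none => false

-- the sort key 'letter_number[1]' (total form; Pre_ excludes the IndexError inputs)
def pvKey (s : String) : Char := (PySem.Str.pyGet? s 1).getD ' '

def combine_strings_and_numbers (strings : List String) (num_combinations : Int) (excluded_multiples : Option Int) : List String :=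
  let answer := strings.foldl (fun acc letter =>
    (PySem.List.pyRange 1 (num_combinations + 1) 1).foldl (fun acc2 number =>
      if pvSkip excluded_multiples number then acc2
      else acc2 ++ [letter ++ PySem.Int.toStr number]) acc) []
  PySem.List.sorted answer pvKey false

-- ===== PORT B =====
def combine_strings_and_numbers_alt (strings : List String) (num_combinations : Int) (excluded_multiples : Option Int) : List String :=
  let buckets := strings.foldl (fun bs letter =>
      (PySem.List.pyRange 1 (num_combinations + 1) 1).foldl (fun bs2 number =>
        if pvSkip excluded_multiples number then bs2
        else
          let s := letter ++ PySem.Int.toStr number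
          bs2.set (pvKey s).toNat (bs2.getD (pvKey s).toNat [] ++ [s])) bs)
    (List.replicate 128 ([] : List String))
  buckets.foldl (fun out b => out ++ b) []

-- ===== PRECONDITION & SPEC =====
-- Pre_ excludes exactly the inputs where the Python A raises: ZeroDivisionError
-- (modulus 0 with a nonempty strings list and a nonempty number range) and
-- IndexError from the sort key s[1] (an empty string combined with a kept
-- one-digit number); B raises on exactly the same inputs.
def Pre_combine_strings_and_numbers (strings : List String) (num_combinations : Int) (excluded_multiples : Option Int) : Prop :=
  (strings = [] ∨ num_combinations < 1 ∨ excluded_multiples ≠ some 0) ∧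
  ("" ∈ strings → ∀ n ∈ PySem.List.pyRange 1 10 1, n ≤ num_combinations →
      ∃ m, excluded_multiples = some m ∧ PySem.Int.mod n m = 0)
instance (strings : List String) (num_combinations : Int) (excluded_multiples : Option Int) : Decidable (Pre_combine_strings_and_numbers strings num_combinations excluded_multiples) := by unfold Pre_combine_strings_and_numbers; infer_instance

def pvWitness_combine_strings_and_numbers : List String × Int × Option Int := (["a", "bc"], 5, some 2)

def Spec_combine_strings_and_numbers (strings : List String) (num_combinations : Int) (excluded_multiples : Option Int) (out : List String) : Prop := out = combine_strings_and_numbers_alt strings num_combinations excluded_multiples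
instance (strings : List String) (num_combinations : Int) (excluded_multiples : Option Int) (out : List String) : Decidable (Spec_combine_strings_and_numbers strings num_combinations excluded_multiples out) := by unfold Spec_combine_strings_and_numbers; infer_instance

-- ===== CLAIM (what is proved, stated in full; the proofs are below) =====
def Claim_equal_combine_strings_and_numbers : Prop := ∀ (strings : List String) (num_combinations : Int) (excluded_multiples : Option Int), Dom_combine_strings_and_numbers strings num_combinations excluded_multiples → Pre_combine_strings_and_numbers strings num_combinations excluded_multiples → Spec_combine_strings_and_numbers strings num_combinations excluded_multiples (combine_strings_and_numbers strings num_combinations excluded_multiples)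

-- ===== LEMMAS AND PROOFS =====

-- the generated strings, letter-major, as a flatMap
def pvGen (strings : List String) (num_combinations : Int) (excluded_multiples : Option Int) : List String :=
  strings.flatMap (fun letter =>
    (((PySem.List.pyRange 1 (num_combinations + 1) 1).filter (fun n => !pvSkip excluded_multiples n)).map
      (fun n => letter ++ PySem.Int.toStr n)))

-- one bucket-append step of B
def pvBStep (bs2 : List (List String)) (x : String) : List (List String) :=
  bs2.set (pvKey x).toNat (bs2.getD (pvKey x).toNat [] ++ [x])

theorem pv_foldl_skip {α β : Type} (p : α → Bool) (f : α → β) (l : List α) (acc : List β) :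
    l.foldl (fun acc x => if p x then acc else acc ++ [f x]) acc
      = acc ++ (l.filter (fun x => !p x)).map f := by
  have h : (fun (acc : List β) (x : α) => if p x then acc else acc ++ [f x])
      = (fun acc x => if (!p x) then acc ++ [f x] else acc) := by
    funext acc x
    cases hp : p x
    · simp
    · simp
  rw [h]
  exact PySem.List.foldl_append_if (fun x => !p x) f l acc

-- a skip-guarded fold is the fold of the filtered-and-mapped list
theorem pv_foldl_skip_gen {α β γ : Type} (p : α → Bool) (f : α → β) (g : γ → β → γ)
    (l : List α) (acc : γ) :
    l.foldl (fun a x => if p x then a else g a (f x)) acc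
      = ((l.filter (fun x => !p x)).map f).foldl g acc := by
  induction l generalizing acc with
  | nil => rfl
  | cons x l ih =>
    cases hp : p x <;> simp [hp, ih]

theorem pvGenA_eq (strings : List String) (nc : Int) (e : Option Int) :
    strings.foldl (fun acc letter =>
        (PySem.List.pyRange 1 (nc + 1) 1).foldl (fun acc2 number =>
          if pvSkip e number then acc2
          else acc2 ++ [letter ++ PySem.Int.toStr number]) acc) []
      = pvGen strings nc e := by
  have h : (fun (acc : List String) (letter : String) =>
        (PySem.List.pyRange 1 (nc + 1) 1).foldl (fun acc2 number =>
          if pvSkip e number then acc2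
          else acc2 ++ [letter ++ PySem.Int.toStr number]) acc)
      = (fun acc letter => acc ++
          (((PySem.List.pyRange 1 (nc + 1) 1).filter (fun n => !pvSkip e n)).map
            (fun n => letter ++ PySem.Int.toStr n))) := by
    funext acc letter
    exact pv_foldl_skip (pvSkip e) (fun n => letter ++ PySem.Int.toStr n) _ acc
  rw [h, PySem.List.foldl_append_eq_flatMap]
  simp [pvGen]

theorem pvA_eq (strings : List String) (nc : Int) (e : Option Int) :
    combine_strings_and_numbers strings nc e
      = PySem.List.sorted (pvGen strings nc e) pvKey false := by
  simp only [combine_strings_and_numbers]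
  rw [pvGenA_eq]

-- characters produced by str(n) are ASCII
theorem pv_digitChar_lt (k : Nat) (hk : k < 10) : (Nat.digitChar k).toNat < 128 := by
  interval_cases k <;> decide

theorem pv_toDigitsCore_lt (f n : Nat) (acc : List Char)
    (hacc : ∀ c ∈ acc, c.toNat < 128) :
    ∀ c ∈ Nat.toDigitsCore 10 f n acc, c.toNat < 128 := by
  induction f generalizing n acc with
  | zero => simpa [Nat.toDigitsCore] using hacc
  | succ f ih =>
    simp only [Nat.toDigitsCore]
    split
    · intro c hc
      rcases List.mem_cons.mp hc with h | h
      · subst h; exact pv_digitChar_lt _ (Nat.mod_lt _ (by norm_num))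
      · exact hacc c h
    · intro c hc
      refine ih _ _ (fun c hc => ?_) c hc
      rcases List.mem_cons.mp hc with h | h
      · subst h; exact pv_digitChar_lt _ (Nat.mod_lt _ (by norm_num))
      · exact hacc c h

theorem pv_toChars_lt (n : Int) : ∀ c ∈ PySem.Int.toChars n, c.toNat < 128 := by
  intro c hc
  unfold PySem.Int.toChars at hc
  split at hc
  · rcases List.mem_cons.mp hc with h | h
    · subst h; decide
    · exact pv_toDigitsCore_lt _ _ _ (by simp) c h
  · exact pv_toDigitsCore_lt _ _ _ (by simp) c hc

theorem pv_key_lt (strings : List String) (nc : Int) (e : Option Int)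
    (hdom : Dom_combine_strings_and_numbers strings nc e) :
    ∀ x ∈ pvGen strings nc e, (pvKey x).toNat < 128 := by
  intro x hx
  rcases List.mem_flatMap.mp hx with ⟨letter, hlet, hx⟩
  rcases List.mem_map.mp hx with ⟨n, _, rfl⟩
  have hmem : pvKey (letter ++ PySem.Int.toStr n) = ' ' ∨
      pvKey (letter ++ PySem.Int.toStr n) ∈ (letter ++ PySem.Int.toStr n).toList := by
    unfold pvKey
    cases h : PySem.Str.pyGet? (letter ++ PySem.Int.toStr n) 1 with
    | none => left; rfl
    | some c =>
      right
      exact PySem.List.mem_of_pyGet?_eq_some _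
        (show PySem.List.pyGet? (letter ++ PySem.Int.toStr n).toList 1 = some c by
          simpa [PySem.Str.pyGet?, PySem.Chars.pyGet?] using h)
  rcases hmem with h | h
  · rw [h]; decide
  · rw [String.toList_append] at h
    rcases List.mem_append.mp h with h | h
    · unfold Dom_combine_strings_and_numbers at hdom
      simp only [Bool.and_eq_true, List.all_eq_true] at hdom
      have hs := hdom.1.1 letter hlet
      unfold pvDomStr at hs
      have hc := (List.all_eq_true.mp hs) _ h
      unfold pvDomChar at hc
      simp only [Bool.or_eq_true, Bool.and_eq_true, decide_eq_true_eq, beq_iff_eq] at hc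
      omega
    · have ht : (PySem.Int.toStr n).toList = PySem.Int.toChars n := PySem.Int.toList_toStr n
      rw [ht] at h
      exact pv_toChars_lt n _ h

-- bucket invariant: every string already in bucket j has key code off + j
def pvGood (bs : List (List String)) (off : Nat) : Prop :=
  ∀ j : Nat, ∀ x ∈ bs.getD j [], (pvKey x).toNat = off + j

theorem pv_insertBy_append_left {α : Type} (p : α → α → Bool) (x : α) (l1 l2 : List α)
    (h : ∀ y ∈ l1, p x y = false) :
    PySem.List.insertBy p x (l1 ++ l2) = l1 ++ PySem.List.insertBy p x l2 := by
  induction l1 with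
  | nil => simp
  | cons a l1 ih =>
    simp only [List.cons_append, PySem.List.insertBy, h a (by simp)]
    simp only [Bool.false_eq_true, if_false, List.cons.injEq, true_and]
    exact ih (fun y hy => h y (by simp [hy]))

theorem pv_insertBy_all_true {α : Type} (p : α → α → Bool) (x : α) (l : List α)
    (h : ∀ y ∈ l, p x y = true) :
    PySem.List.insertBy p x l = x :: l := by
  cases l with
  | nil => rfl
  | cons a l => simp [PySem.List.insertBy, h a (by simp)]

theorem pv_char_lt_iff (a b : Char) : a < b ↔ a.toNat < b.toNat := by
  rw [Char.lt_def]
  exact UInt32.lt_iff_toNat_lt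

theorem pv_good_cons_head (b : List String) (rest : List (List String)) (off : Nat)
    (hg : pvGood (b :: rest) off) : ∀ x ∈ b, (pvKey x).toNat = off :=
  fun x hx => by simpa using hg 0 x (by simpa [List.getD] using hx)

theorem pv_good_cons_tail (b : List String) (rest : List (List String)) (off : Nat)
    (hg : pvGood (b :: rest) off) : pvGood rest (off + 1) := by
  intro j x hx
  have := hg (j + 1) x (by simpa [List.getD] using hx)
  omega

theorem pv_ins_flatten (bs : List (List String)) (off k : Nat) (x : String)
    (hg : pvGood bs off) (hk : k < bs.length) (hx : (pvKey x).toNat = off + k) :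
    PySem.List.insertBy (fun a b => decide (pvKey a < pvKey b)) x bs.flatten
      = (bs.set k (bs.getD k [] ++ [x])).flatten := by
  induction bs generalizing off k with
  | nil => simp at hk
  | cons b rest ih =>
    have hhead := pv_good_cons_head b rest off hg
    have htail := pv_good_cons_tail b rest off hg
    cases k with
    | zero =>
      have h1 : ∀ y ∈ b, (decide (pvKey x < pvKey y)) = false := by
        intro y hy
        simp only [decide_eq_false_iff_not, pv_char_lt_iff]
        have := hhead y hy
        omega
      have h2 : ∀ y ∈ rest.flatten, (decide (pvKey x < pvKey y)) = true := by
        intro y hy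
        rcases List.mem_flatten.mp hy with ⟨l, hl, hy⟩
        rcases List.getElem_of_mem hl with ⟨j, hj, rfl⟩
        have := htail j y (by simp [List.getD, List.getElem?_eq_getElem hj, hy])
        simp only [decide_eq_true_eq, pv_char_lt_iff]
        omega
      simp only [List.flatten_cons]
      rw [pv_insertBy_append_left _ _ _ _ h1, pv_insertBy_all_true _ _ _ h2]
      simp [List.getD]
    | succ k =>
      have h1 : ∀ y ∈ b, (decide (pvKey x < pvKey y)) = false := by
        intro y hy
        simp only [decide_eq_false_iff_not, pv_char_lt_iff]
        have := hhead y hy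
        omega
      simp only [List.flatten_cons]
      rw [pv_insertBy_append_left _ _ _ _ h1,
        ih (off + 1) k htail (by simpa using hk) (by omega)]
      simp [List.getD]

theorem pv_good_set (bs : List (List String)) (off k : Nat) (x : String)
    (hg : pvGood bs off) (hx : (pvKey x).toNat = off + k) :
    pvGood (bs.set k (bs.getD k [] ++ [x])) off := by
  intro j y hy
  simp only [List.getD] at hy
  rw [List.getElem?_set] at hy
  by_cases hjk : k = j
  · subst hjk
    rw [if_pos rfl] at hy
    by_cases hlt : k < bs.length
    · rw [if_pos hlt, Option.getD_some] at hy
      rcases List.mem_append.mp hy with h | h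
      · exact hg k y (by simpa [List.getD] using h)
      · simp only [List.mem_singleton] at h; subst h; exact hx
    · rw [if_neg hlt] at hy
      simp at hy
  · rw [if_neg hjk] at hy
    exact hg j y (by simpa [List.getD] using hy)

theorem pv_good_init : pvGood (List.replicate 128 ([] : List String)) 0 := by
  intro j x hx
  simp only [List.getD, List.getElem?_replicate] at hx
  split at hx <;> simp at hx

theorem pv_fold_buckets (xs : List String) (bs : List (List String))
    (hlen : bs.length = 128) (hg : pvGood bs 0)
    (hmem : ∀ x ∈ xs, (pvKey x).toNat < 128) :
    xs.foldl (fun acc x => PySem.List.insertBy (fun a b => decide (pvKey a < pvKey b)) x acc) bs.flatten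
      = (xs.foldl pvBStep bs).flatten := by
  induction xs generalizing bs with
  | nil => rfl
  | cons x xs ih =>
    have hx : (pvKey x).toNat < 128 := hmem x (by simp)
    simp only [List.foldl_cons]
    rw [show pvBStep bs x = bs.set (pvKey x).toNat (bs.getD (pvKey x).toNat [] ++ [x]) from rfl,
      pv_ins_flatten bs 0 (pvKey x).toNat x hg (by omega) (by omega)]
    have hg' : pvGood (bs.set (pvKey x).toNat (bs.getD (pvKey x).toNat [] ++ [x])) 0 :=
      pv_good_set bs 0 (pvKey x).toNat x hg (by omega)
    exact ih _ (by simp [hlen]) hg' (fun y hy => hmem y (by simp [hy]))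

theorem pv_foldl_flatMap {α β γ : Type} (l : List α) (g : α → List β) (f : γ → β → γ) (a : γ) :
    (l.flatMap g).foldl f a = l.foldl (fun a x => (g x).foldl f a) a := by
  induction l generalizing a with
  | nil => rfl
  | cons x l ih => simp only [List.flatMap_cons, List.foldl_append, List.foldl_cons, ih]

theorem pv_foldl_concat {α : Type} (l : List (List α)) (acc : List α) :
    l.foldl (fun out b => out ++ b) acc = acc ++ l.flatten := by
  induction l generalizing acc with
  | nil => simp
  | cons b l ih => simp [ih, List.append_assoc]

theorem pvGenB_eq (strings : List String) (nc : Int) (e : Option Int)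
    (bs : List (List String)) :
    strings.foldl (fun bs letter =>
        (PySem.List.pyRange 1 (nc + 1) 1).foldl (fun bs2 number =>
          if pvSkip e number then bs2
          else
            let s := letter ++ PySem.Int.toStr number
            bs2.set (pvKey s).toNat (bs2.getD (pvKey s).toNat [] ++ [s])) bs) bs
      = (pvGen strings nc e).foldl pvBStep bs := by
  rw [pvGen, pv_foldl_flatMap]
  congr 1
  funext a letter
  exact pv_foldl_skip_gen (pvSkip e) (fun n => letter ++ PySem.Int.toStr n) pvBStep _ a

theorem pvB_eq (strings : List String) (nc : Int) (e : Option Int) :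
    combine_strings_and_numbers_alt strings nc e
      = ((pvGen strings nc e).foldl pvBStep (List.replicate 128 [])).flatten := by
  simp only [combine_strings_and_numbers_alt]
  rw [pvGenB_eq strings nc e (List.replicate 128 [])]
  exact pv_foldl_concat _ []

-- ===== VERDICT (by name: the statement is the Claim_ definition above) =====
theorem combine_strings_and_numbers_spec : Claim_equal_combine_strings_and_numbers := by
  intro strings nc e hdom hpre
  unfold Spec_combine_strings_and_numbers
  rw [pvA_eq, pvB_eq, PySem.List.sorted_eq_foldl_insertBy]
  have h := pv_fold_buckets (pvGen strings nc e) (List.replicate 128 [])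
    (by simp) pv_good_init (pv_key_lt strings nc e hdom)
  rw [show (List.replicate 128 ([] : List String)).flatten = [] from by simp] at h
  exact h
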